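-- pv_equiv track=rewrite | github.com/xwzliang/ComfyUI_YuE | inference/infer_stage2.py | split_bsz
-- ===== SOURCE A (Python) =====
-- import math
--
-- def split_bsz(bsz, maxbsz):
--     n_sub_batches = math.ceil(bsz / maxbsz)
--     base_size = bsz // n_sub_batches
--     remainder = bsz % n_sub_batches
--     sub_batch_sizes = [base_size + 1] * remainder + [base_size] * (n_sub_batches - remainder)
--     indices = []
--     start = 0
--     for size in sub_batch_sizes:
--         end = start + size
--         indices.append((start, end))
--         start = end
--     return indices
-- ===== SOURCE B (Python) =====
-- import math
--
-- def split_bsz(bsz, maxbsz):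
--     n_sub_batches = math.ceil(bsz / maxbsz)
--     base_size, remainder = divmod(bsz, n_sub_batches)
--     # closed-form start for sub-batch i: the first `remainder` chunks have size
--     # base_size+1, the rest base_size, so start(i) = i*base_size + min(i, remainder)
--     return [(i * base_size + min(i, remainder),
--              (i + 1) * base_size + min(i + 1, remainder))
--             for i in range(n_sub_batches)]
-- ===== Notes on version B (the rewrite author's own statement) =====
-- stated objective: simpler
-- what changed: Replaces the materialised sub_batch_sizes list and the running start accumulator with a single comprehension over range(n_sub_batches) computing each (start, end) pair by the closed form i*base_size + min(i, remainder).
import Mathlib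
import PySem

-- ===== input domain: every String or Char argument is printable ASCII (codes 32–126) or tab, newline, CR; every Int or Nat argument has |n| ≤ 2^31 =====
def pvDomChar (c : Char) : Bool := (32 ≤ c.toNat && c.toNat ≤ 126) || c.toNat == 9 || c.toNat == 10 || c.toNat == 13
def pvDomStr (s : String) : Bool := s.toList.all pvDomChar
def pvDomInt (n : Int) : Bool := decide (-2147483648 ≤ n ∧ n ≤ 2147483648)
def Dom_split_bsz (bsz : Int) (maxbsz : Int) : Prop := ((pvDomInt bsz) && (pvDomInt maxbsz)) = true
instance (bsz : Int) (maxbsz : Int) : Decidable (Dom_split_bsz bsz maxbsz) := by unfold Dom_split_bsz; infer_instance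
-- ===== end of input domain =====

-- B replaces A's materialised size list + running-start fold by one map over the
-- index range with a closed-form start i*base + min i r (objective: simpler).


-- ===== PORT A =====
-- the loop body: end = start + size; indices.append((start, end)); start = end
def pvStep (st : List (Int × Int) × Int) (size : Int) : List (Int × Int) × Int :=
  (st.1 ++ [(st.2, st.2 + size)], st.2 + size)

def split_bsz (bsz : Int) (maxbsz : Int) : List (Int × Int) :=
  -- math.ceil(bsz / maxbsz): exact as -((-bsz) // maxbsz) on Dom (|bsz| < 2^53)
  let n_sub_batches : Int := -(PySem.Int.floordiv (-bsz) maxbsz)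
  let base_size := PySem.Int.floordiv bsz n_sub_batches
  let remainder := PySem.Int.mod bsz n_sub_batches
  let sub_batch_sizes :=
    PySem.List.pyRepeat [base_size + 1] remainder ++
    PySem.List.pyRepeat [base_size] (n_sub_batches - remainder)
  (sub_batch_sizes.foldl pvStep ([], 0)).1

-- ===== PORT B =====
def split_bsz_alt (bsz : Int) (maxbsz : Int) : List (Int × Int) :=
  let n : Int := -(PySem.Int.floordiv (-bsz) maxbsz)   -- math.ceil(bsz / maxbsz), exact on Dom
  let base := PySem.Int.floordiv bsz n
  let r := PySem.Int.mod bsz n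
  (PySem.List.pyRange 0 n 1).map (fun i =>
    (i * base + min i r, (i + 1) * base + min (i + 1) r))

-- ===== PRECONDITION & SPEC =====
-- A raises ZeroDivisionError when maxbsz = 0 (the float division) or when
-- n_sub_batches = ceil(bsz/maxbsz) = 0 (the // and %); B raises there too.
def Pre_split_bsz (bsz : Int) (maxbsz : Int) : Prop :=
  maxbsz ≠ 0 ∧ -(PySem.Int.floordiv (-bsz) maxbsz) ≠ 0
instance (bsz : Int) (maxbsz : Int) : Decidable (Pre_split_bsz bsz maxbsz) := by
  unfold Pre_split_bsz; infer_instance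
def pvWitness_split_bsz : Int × Int := (10, 3)

def Spec_split_bsz (bsz : Int) (maxbsz : Int) (out : List (Int × Int)) : Prop := out = split_bsz_alt bsz maxbsz
instance (bsz : Int) (maxbsz : Int) (out : List (Int × Int)) : Decidable (Spec_split_bsz bsz maxbsz out) := by unfold Spec_split_bsz; infer_instance

-- ===== CLAIM (what is proved, stated in full; the proofs are below) =====
def Claim_equal_split_bsz : Prop := ∀ (bsz : Int) (maxbsz : Int), Dom_split_bsz bsz maxbsz → Pre_split_bsz bsz maxbsz → Spec_split_bsz bsz maxbsz (split_bsz bsz maxbsz)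

-- ===== LEMMAS AND PROOFS =====

-- A's fold over a constant-size block, in closed form.
lemma fold_replicate (m : Nat) (c s : Int) (acc : List (Int × Int)) :
    (List.replicate m c).foldl pvStep (acc, s) =
      (acc ++ (List.range m).map (fun k : Nat => (s + (k : Int) * c, s + ((k : Int) + 1) * c)),
       s + (m : Int) * c) := by
  induction m generalizing acc s with
  | zero => simp
  | succ m ih =>
      rw [List.replicate_succ, List.foldl_cons]
      show (List.replicate m c).foldl pvStep (acc ++ [(s, s + c)], s + c) = _
      rw [ih]
      simp only [Prod.mk.injEq]
      constructor
      · rw [List.range_succ_eq_map, List.map_cons, List.map_map, List.append_assoc,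
            List.singleton_append]
        congr 1
        congr 1
        · norm_num
        · apply List.map_congr_left
          intro k _
          simp only [Function.comp, Nat.succ_eq_add_one, Prod.mk.injEq]
          push_cast
          constructor <;> ring
      · push_cast; ring

theorem split_bsz_spec_aux (bsz maxbsz : Int) (h : Pre_split_bsz bsz maxbsz) :
    split_bsz bsz maxbsz = split_bsz_alt bsz maxbsz := by
  obtain ⟨hm, hn⟩ := h
  simp only [split_bsz, split_bsz_alt]
  set n : Int := -(PySem.Int.floordiv (-bsz) maxbsz) with hndef
  set base := PySem.Int.floordiv bsz n with hbdef
  set r := PySem.Int.mod bsz n with hrdef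
  rcases lt_trichotomy n 0 with hneg | hzero | hpos
  · -- n < 0 : Python gives the empty list on both sides
    have hmm := PySem.Int.mod_neg_neg bsz n
    have h1 : (0:Int) ≤ PySem.Int.mod (-bsz) (-n) := by
      rw [PySem.Int.mod_eq_emod_of_pos (by omega : (0:Int) < -n)]
      exact Int.emod_nonneg _ (by omega)
    have h2 : PySem.Int.mod (-bsz) (-n) < -n := by
      rw [PySem.Int.mod_eq_emod_of_pos (by omega : (0:Int) < -n)]
      exact Int.emod_lt_of_pos _ (by omega)
    have e1 : r.toNat = 0 := by omega
    have e2 : (n - r).toNat = 0 := by omega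
    simp [PySem.List.pyRepeat_singleton, e1, e2,
          PySem.List.pyRange_one_eq_nil (by omega : n ≤ (0:Int))]
  · exact absurd hzero hn
  · -- n > 0 : the real case
    have hr0 : 0 ≤ r := by
      rw [hrdef, PySem.Int.mod_eq_emod_of_pos hpos]; exact Int.emod_nonneg _ (by omega)
    have hrn : r < n := by
      rw [hrdef, PySem.Int.mod_eq_emod_of_pos hpos]; exact Int.emod_lt_of_pos _ hpos
    -- LHS: the fold over the two replicate blocks
    rw [PySem.List.pyRepeat_singleton, PySem.List.pyRepeat_singleton,
        List.foldl_append, fold_replicate]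
    rw [fold_replicate]
    have er : ((r.toNat : Int)) = r := by omega
    dsimp only
    simp only [List.nil_append, zero_add, er]
    -- RHS: split the index range at r
    rw [PySem.List.pyRange_one_append 0 r n hr0 (le_of_lt hrn),
        List.map_append, PySem.List.pyRange_one 0 r, PySem.List.pyRange_one r n,
        List.map_map, List.map_map]
    simp only [Int.sub_zero, zero_add]
    congr 1
    · apply List.map_congr_left
      intro k hk
      rw [List.mem_range] at hk
      have hk' : (k : Int) < r := by omega
      simp only [Function.comp]
      have m1 : min (k : Int) r = (k : Int) := by omega
      have m2 : min ((k : Int) + 1) r = (k : Int) + 1 := by omega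
      rw [m1, m2]
      simp only [Prod.mk.injEq]
      constructor <;> ring
    · apply List.map_congr_left
      intro k hk
      rw [List.mem_range] at hk
      have hk' : (k : Int) < n - r := by omega
      simp only [Function.comp]
      have m1 : min (r + (k : Int)) r = r := by omega
      have m2 : min (r + (k : Int) + 1) r = r := by omega
      rw [m1, m2]
      simp only [Prod.mk.injEq]
      constructor <;> ring

-- ===== VERDICT (by name: the statement is the Claim_ definition above) =====
theorem split_bsz_spec : Claim_equal_split_bsz := by
  intro bsz maxbsz _ hpre
  exact split_bsz_spec_aux bsz maxbsz hpre
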